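-- pv_equiv track=rewrite | github.com/Oguzhan53/Encryption-decryption-AES- | aes/aes.py | removePad
-- ===== SOURCE A (Python) =====
-- def removePad(plaintext):  # This function removes pad from end of the message if pad has been added
--     for i in range(len(plaintext)):
--         if plaintext[i] == (plaintext[0] ^ plaintext[1]):
--             for j in range(i, len(plaintext)):
--                 if plaintext[j] != (plaintext[0] ^ plaintext[1]):
--                     break
--             if j == len(plaintext) - 1:
--                 return plaintext[:i]
--                 break
--
--     return plaintext
-- ===== SOURCE B (Python) =====
-- def removePad(plaintext):  # strip the maximal trailing run of the pad byte (pad = first two bytes XORed)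
--     n = len(plaintext)
--     if n < 2:
--         return plaintext
--     pad = plaintext[0] ^ plaintext[1]
--     i = n
--     while i > 0 and plaintext[i - 1] == pad:
--         i -= 1
--     return plaintext[:i]
-- ===== Notes on version B (the rewrite author's own statement) =====
-- stated objective: alternative
-- what changed: Replaces A's nested forward scans (outer index loop plus inner run-check rescanning to the end) with a single backward pass that strips the maximal trailing run of the pad byte.
-- intended difference: On lists whose second-to-last byte equals the pad byte (first two bytes XORed) but whose last byte does not, A truncates at the start of that pad run because its inner loop's leftover index j still equals len-1 after the break, while B returns the list unchanged, the intended value since the padding run does not reach the end of the message. — e.g. on removePad([1, 2, 3, 5]): A returns [1, 2], B returns [1, 2, 3, 5]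
-- outside the precondition, e.g. on removePad([1]): A raises IndexError, B returns [1]
import Mathlib
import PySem

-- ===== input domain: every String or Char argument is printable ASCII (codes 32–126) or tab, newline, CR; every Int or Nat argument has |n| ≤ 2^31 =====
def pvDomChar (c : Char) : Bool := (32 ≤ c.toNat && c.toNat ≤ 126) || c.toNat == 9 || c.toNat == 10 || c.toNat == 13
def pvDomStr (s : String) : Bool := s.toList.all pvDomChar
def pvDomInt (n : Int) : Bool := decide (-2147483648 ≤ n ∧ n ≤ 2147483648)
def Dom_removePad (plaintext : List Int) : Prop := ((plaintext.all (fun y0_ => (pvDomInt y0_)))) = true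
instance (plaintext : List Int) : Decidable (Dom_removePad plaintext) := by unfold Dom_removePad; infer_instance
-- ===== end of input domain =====

-- B strips the maximal trailing run of the pad byte in one backward pass instead of A's nested
-- forward scans; on inputs where the last byte is not the pad byte but its predecessor is, A chops
-- the list anyway (leftover inner-loop index j), while B returns it unchanged (stated in D_ below).

-- ===== PORT A =====
-- inner loop: for j in range(i, n): if p[j] != pad: break   (returns the final value of j)
def removePadInnerGo (p : List Int) (pad : Int) : Nat → Nat → Nat
  | j, rem + 1 =>
    if p.getD j 0 ≠ pad then j
    else if j + 1 < p.length then removePadInnerGo p pad (j + 1) rem else j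
  | j, 0 => j

def removePadInner (p : List Int) (pad : Int) (j : Nat) : Nat :=
  removePadInnerGo p pad j (p.length - j)

-- outer loop over i in range(n)
def removePadOuterGo (p : List Int) (pad : Int) : Nat → Nat → List Int
  | i, rem + 1 =>
    if p.getD i 0 = pad then
      if removePadInner p pad i = p.length - 1 then p.take i
      else removePadOuterGo p pad (i + 1) rem
    else removePadOuterGo p pad (i + 1) rem
  | _, 0 => p

def removePadOuter (p : List Int) (pad : Int) (i : Nat) : List Int :=
  removePadOuterGo p pad i (p.length - i)

def removePad (plaintext : List Int) : List Int :=
  removePadOuter plaintext (PySem.Int.bxor (plaintext.getD 0 0) (plaintext.getD 1 0)) 0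

-- ===== PORT B =====
-- while i > 0 and plaintext[i-1] == pad: i -= 1   (argument is the current i)
def removePadAltLoop (p : List Int) (pad : Int) : Nat → Nat
  | 0 => 0
  | i + 1 => if p.getD i 0 = pad then removePadAltLoop p pad i else i + 1

def removePad_alt (plaintext : List Int) : List Int :=
  if plaintext.length < 2 then plaintext
  else
    plaintext.take
      (removePadAltLoop plaintext (PySem.Int.bxor (plaintext.getD 0 0) (plaintext.getD 1 0))
        plaintext.length)

-- ===== PRECONDITION & SPEC =====
-- Pre_ excludes exactly the length-1 lists, on which A raises IndexError reading plaintext[1].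
def Pre_removePad (plaintext : List Int) : Prop := plaintext.length ≠ 1
instance (plaintext : List Int) : Decidable (Pre_removePad plaintext) := by
  unfold Pre_removePad; infer_instance

def pvWitness_removePad : List Int := [1, 2, 3, 3]

-- On lists whose last byte differs from the pad byte (first two bytes XORed) while the
-- second-to-last equals it, A truncates at the start of that pad run (its inner-loop index j is
-- left at len-1 by the break), whereas B returns the list unchanged — the intended value, since
-- the padding run does not extend to the end of the message.
def D_removePad (plaintext : List Int) : Prop :=
  2 ≤ plaintext.length ∧
    plaintext.getD (plaintext.length - 2) 0 =
      PySem.Int.bxor (plaintext.getD 0 0) (plaintext.getD 1 0) ∧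
    plaintext.getD (plaintext.length - 1) 0 ≠
      PySem.Int.bxor (plaintext.getD 0 0) (plaintext.getD 1 0)
instance (plaintext : List Int) : Decidable (D_removePad plaintext) := by
  unfold D_removePad; infer_instance

def Spec_removePad (plaintext : List Int) (out : List Int) : Prop :=
  ¬ D_removePad plaintext → out = removePad_alt plaintext
instance (plaintext : List Int) (out : List Int) : Decidable (Spec_removePad plaintext out) := by
  unfold Spec_removePad; infer_instance

def pvDiffWitness_removePad : List Int := [1, 2, 3, 5]
def pvDiffWitnessOut_removePad : (List Int) × (List Int) := ([1, 2], [1, 2, 3, 5])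

-- ===== CLAIM =====
def Claim_unchanged_removePad : Prop :=
  ∀ (plaintext : List Int), Dom_removePad plaintext → Pre_removePad plaintext →
    Spec_removePad plaintext (removePad plaintext)
def Claim_changed_removePad : Prop :=
  Dom_removePad (pvDiffWitness_removePad) ∧ Pre_removePad (pvDiffWitness_removePad) ∧
    D_removePad (pvDiffWitness_removePad) ∧
    removePad (pvDiffWitness_removePad) = pvDiffWitnessOut_removePad.1 ∧
    removePad_alt (pvDiffWitness_removePad) = pvDiffWitnessOut_removePad.2 ∧
    pvDiffWitnessOut_removePad.1 ≠ pvDiffWitnessOut_removePad.2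
def Claim_exact_removePad : Prop :=
  ∀ (plaintext : List Int), Dom_removePad plaintext → Pre_removePad plaintext →
    D_removePad plaintext → removePad plaintext ≠ removePad_alt plaintext

-- ===== LEMMAS AND PROOFS =====

-- the condition under which A's inner loop ends with j = len-1 from index i
def PadRun (p : List Int) (pad : Int) (i : Nat) : Prop :=
  p.getD i 0 = pad ∧ ∀ k, i ≤ k → k < p.length - 1 → p.getD k 0 = pad

theorem removePadInnerGo_eq_iff (p : List Int) (pad : Int) :
    ∀ rem j, j < p.length → rem = p.length - j →
      (removePadInnerGo p pad j rem = p.length - 1 ↔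
        ∀ k, j ≤ k → k < p.length - 1 → p.getD k 0 = pad) := by
  intro rem
  induction rem with
  | zero => intro j hj hrem; omega
  | succ rem ih =>
    intro j hj hrem
    simp only [removePadInnerGo]
    split_ifs with h1 h2
    · constructor
      · intro hj1 k hk1 hk2; omega
      · intro hall
        by_contra hne
        exact h1 (hall j le_rfl (by omega))
    · rw [ih (j + 1) h2 (by omega)]
      constructor
      · intro hall k hk1 hk2
        rcases Nat.eq_or_lt_of_le hk1 with h | h
        · rw [← h]; exact not_not.mp h1
        · exact hall k h hk2
      · intro hall k hk1 hk2; exact hall k (by omega) hk2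
    · have : j = p.length - 1 := by omega
      constructor
      · intro _ k hk1 hk2; omega
      · intro _; exact this

theorem removePadInner_eq_iff (p : List Int) (pad : Int) (j : Nat) (hj : j < p.length) :
    removePadInner p pad j = p.length - 1 ↔
      ∀ k, j ≤ k → k < p.length - 1 → p.getD k 0 = pad :=
  removePadInnerGo_eq_iff p pad (p.length - j) j hj rfl

theorem removePadOuterGo_none (p : List Int) (pad : Int) :
    ∀ rem i, rem = p.length - i →
      (∀ i0, i ≤ i0 → i0 < p.length → ¬ PadRun p pad i0) →
      removePadOuterGo p pad i rem = p := by
  intro rem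
  induction rem with
  | zero => intro i _ _; rfl
  | succ rem ih =>
    intro i hrem H
    have hi : i < p.length := by omega
    simp only [removePadOuterGo]
    split_ifs with h1 h2
    · exact absurd ⟨h1, (removePadInner_eq_iff p pad i hi).mp h2⟩ (H i le_rfl hi)
    · exact ih (i + 1) (by omega) (fun i0 h h' => H i0 (by omega) h')
    · exact ih (i + 1) (by omega) (fun i0 h h' => H i0 (by omega) h')

theorem removePadOuterGo_found (p : List Int) (pad : Int) (i0 : Nat)
    (h2 : i0 < p.length) (hP : PadRun p pad i0) :
    ∀ rem i, rem = p.length - i → i ≤ i0 →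
      (∀ i', i ≤ i' → i' < i0 → ¬ PadRun p pad i') →
      removePadOuterGo p pad i rem = p.take i0 := by
  intro rem
  induction rem with
  | zero => intro i hrem hi _; omega
  | succ rem ih =>
    intro i hrem hi hmin
    have hilen : i < p.length := by omega
    simp only [removePadOuterGo]
    rcases Nat.eq_or_lt_of_le hi with heq | hlt
    · subst heq
      rw [if_pos hP.1, if_pos ((removePadInner_eq_iff p pad i hilen).mpr hP.2)]
    · split_ifs with ha hb
      · exact absurd ⟨ha, (removePadInner_eq_iff p pad i hilen).mp hb⟩ (hmin i le_rfl hlt)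
      · exact ih (i + 1) (by omega) hlt (fun i' h h' => hmin i' (by omega) h')
      · exact ih (i + 1) (by omega) hlt (fun i' h h' => hmin i' (by omega) h')

theorem removePadOuterGo_short (p : List Int) (pad : Int) :
    ∀ rem i, rem = p.length - i →
      (∃ i0, i ≤ i0 ∧ i0 < p.length ∧ PadRun p pad i0) →
      (removePadOuterGo p pad i rem).length < p.length := by
  intro rem
  induction rem with
  | zero => intro i hrem ⟨i0, h1, h2, _⟩; omega
  | succ rem ih =>
    intro i hrem ⟨i0, hii0, hi0, hP⟩
    have hilen : i < p.length := by omega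
    simp only [removePadOuterGo]
    split_ifs with h1 h2
    · simp only [List.length_take]; omega
    · refine ih (i + 1) (by omega) ⟨i0, ?_, hi0, hP⟩
      rcases Nat.eq_or_lt_of_le hii0 with heq | hlt
      · exact absurd ((removePadInner_eq_iff p pad i hilen).mpr (heq ▸ hP.2)) h2
      · omega
    · refine ih (i + 1) (by omega) ⟨i0, ?_, hi0, hP⟩
      rcases Nat.eq_or_lt_of_le hii0 with heq | hlt
      · exact absurd (heq ▸ hP.1) h1
      · omega

theorem removePadAltLoop_spec (p : List Int) (pad : Int) :
    ∀ i, removePadAltLoop p pad i ≤ i ∧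
      (∀ k, removePadAltLoop p pad i ≤ k → k < i → p.getD k 0 = pad) ∧
      (removePadAltLoop p pad i = 0 ∨
        p.getD (removePadAltLoop p pad i - 1) 0 ≠ pad) := by
  intro i
  induction i with
  | zero => exact ⟨le_rfl, fun k h h' => by omega, Or.inl rfl⟩
  | succ i ih =>
    simp only [removePadAltLoop]
    split_ifs with h
    · obtain ⟨ha, hb, hc⟩ := ih
      refine ⟨by omega, fun k hk1 hk2 => ?_, hc⟩
      rcases Nat.lt_or_ge k i with h' | h'
      · exact hb k hk1 h'
      · have : k = i := by omega
        rw [this]; exact h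
    · exact ⟨le_rfl, fun k hk1 hk2 => by omega, Or.inr (by simpa using h)⟩

theorem removePad_eq_of_not_D (p : List Int) (hpre : p.length ≠ 1)
    (hnD : ¬ D_removePad p) : removePad p = removePad_alt p := by
  unfold removePad removePad_alt removePadOuter
  by_cases hn : p.length < 2
  · have h0 : p.length = 0 := by omega
    rw [if_pos hn, h0]
    rfl
  · rw [if_neg hn]
    have hn2 : 2 ≤ p.length := by omega
    set pad := PySem.Int.bxor (p.getD 0 0) (p.getD 1 0) with hpad
    set r := removePadAltLoop p pad p.length with hr
    obtain ⟨hrle, hrun, hlast⟩ := removePadAltLoop_spec p pad p.length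
    rw [← hr] at hrle hrun hlast
    by_cases hl : p.getD (p.length - 1) 0 = pad
    · have hrn : r < p.length := by
        rcases Nat.lt_or_ge r p.length with h | h
        · exact h
        · have hreq : r = p.length := by omega
          rcases hlast with h0 | hne
          · omega
          · rw [hreq] at hne; exact absurd hl hne
      have hP : PadRun p pad r :=
        ⟨hrun r le_rfl hrn, fun k hk1 hk2 => hrun k hk1 (by omega)⟩
      have hmin : ∀ i', 0 ≤ i' → i' < r → ¬ PadRun p pad i' := by
        intro i' _ hi' ⟨_, hrun'⟩
        rcases hlast with h0 | hne
        · omega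
        · exact hne (hrun' (r - 1) (by omega) (by omega))
      exact removePadOuterGo_found p pad r hrn hP (p.length - 0) 0 rfl (by omega) hmin
    · have hl2 : p.getD (p.length - 2) 0 ≠ pad := by
        intro h
        exact hnD ⟨hn2, h, hl⟩
      have hrn : r = p.length := by
        rcases Nat.lt_or_ge r p.length with h | h
        · exact absurd (hrun (p.length - 1) (by omega) (by omega)) hl
        · omega
      rw [hrn, List.take_length]
      refine removePadOuterGo_none p pad (p.length - 0) 0 rfl ?_
      intro i0 _ hi0 ⟨hpi0, hrun0⟩
      rcases Nat.lt_or_ge i0 (p.length - 1) with h | h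
      · exact hl2 (hrun0 (p.length - 2) (by omega) (by omega))
      · have : i0 = p.length - 1 := by omega
        rw [this] at hpi0; exact hl hpi0

-- ===== VERDICT =====
theorem removePad_spec : Claim_unchanged_removePad := by
  intro p _ hpre hnD
  exact removePad_eq_of_not_D p hpre hnD
theorem removePad_changed : Claim_changed_removePad := by
  unfold Claim_changed_removePad; decide
theorem removePad_tight : Claim_exact_removePad := by
  intro p _ hpre hD
  obtain ⟨hn2, hA, hB⟩ := hD
  set pad := PySem.Int.bxor (p.getD 0 0) (p.getD 1 0) with hpad
  have halt : removePad_alt p = p := by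
    unfold removePad_alt
    rw [if_neg (by omega)]
    obtain ⟨hrle, hrun, hlast⟩ := removePadAltLoop_spec p pad p.length
    have hrn : removePadAltLoop p pad p.length = p.length := by
      rcases Nat.lt_or_ge (removePadAltLoop p pad p.length) p.length with h | h
      · exact absurd (hrun (p.length - 1) (by omega) (by omega)) hB
      · omega
    rw [← hpad, hrn, List.take_length]
  have hshort : (removePad p).length < p.length := by
    unfold removePad removePadOuter
    refine removePadOuterGo_short p (PySem.Int.bxor (p.getD 0 0) (p.getD 1 0))
      (p.length - 0) 0 rfl ⟨p.length - 2, by omega, by omega, ?_⟩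
    exact ⟨hA, fun k hk1 hk2 => by have : k = p.length - 2 := by omega
                                   rw [this]; exact hA⟩
  intro heq
  rw [heq, halt] at hshort
  omega
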